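-- pv_equiv track=rewrite | github.com/270aldo/Genesis_NGX_1.0 | backend/agents/backend/guardian/services/security_monitor_service.py | _generate_remediation_recommendations
-- ===== SOURCE A (Python) =====
-- from typing import Dict, Any, Optional, List, Set
--
-- def _generate_remediation_recommendations(
--     vulnerabilities: List[Dict[str, Any]]
-- ) -> List[str]:
--     """Generate remediation recommendations."""
--     recommendations = []
--
--     if any(v.get("severity") == "critical" for v in vulnerabilities):
--         recommendations.append("Immediately patch critical vulnerabilities")
--
--     if any(v.get("type") == "misconfiguration" for v in vulnerabilities):
--         recommendations.append("Review and correct security configurations")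
--
--     if any(v.get("type") == "outdated" for v in vulnerabilities):
--         recommendations.append("Update outdated components to latest versions")
--
--     return recommendations
-- ===== SOURCE B (Python) =====
-- from typing import Dict, Any, List
--
-- def _generate_remediation_recommendations(
--     vulnerabilities: List[Dict[str, Any]]
-- ) -> List[str]:
--     """Single pass: track three flags, then emit the fixed-order messages."""
--     critical = misconfig = outdated = False
--     for v in vulnerabilities:
--         if v.get("severity") == "critical":
--             critical = True
--         if v.get("type") == "misconfiguration":
--             misconfig = True
--         if v.get("type") == "outdated":
--             outdated = True
--     out = []
--     if critical:
--         out.append("Immediately patch critical vulnerabilities")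
--     if misconfig:
--         out.append("Review and correct security configurations")
--     if outdated:
--         out.append("Update outdated components to latest versions")
--     return out
-- ===== Notes on version B (the rewrite author's own statement) =====
-- stated objective: alternative
-- what changed: Replaces three separate any() scans over the vulnerability list with one combined traversal that maintains three boolean flags, then emits the messages in the fixed order.
import Mathlib
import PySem

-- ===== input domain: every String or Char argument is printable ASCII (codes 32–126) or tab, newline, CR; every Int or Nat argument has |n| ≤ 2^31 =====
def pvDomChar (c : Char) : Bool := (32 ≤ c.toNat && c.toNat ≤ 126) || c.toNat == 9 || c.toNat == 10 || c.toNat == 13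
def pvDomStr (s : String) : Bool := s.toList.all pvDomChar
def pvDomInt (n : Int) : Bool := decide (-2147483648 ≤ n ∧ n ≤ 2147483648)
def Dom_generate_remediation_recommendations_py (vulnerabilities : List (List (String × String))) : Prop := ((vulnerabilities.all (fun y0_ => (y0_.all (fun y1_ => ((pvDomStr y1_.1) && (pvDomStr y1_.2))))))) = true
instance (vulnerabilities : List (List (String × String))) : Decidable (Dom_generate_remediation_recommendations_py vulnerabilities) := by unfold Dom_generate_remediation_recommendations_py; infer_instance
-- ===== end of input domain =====

-- B replaces three separate any() scans with one single-pass flag-tracking loop; same output, alternative decomposition.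

-- ===== PORT A =====
def generate_remediation_recommendations_py (vulnerabilities : List (List (String × String))) : List String :=
  let recommendations : List String := []
  let recommendations :=
    if vulnerabilities.any (fun v => PySem.Dict.get? (PySem.Dict.mk v) "severity" == some "critical") then
      recommendations ++ ["Immediately patch critical vulnerabilities"] else recommendations
  let recommendations :=
    if vulnerabilities.any (fun v => PySem.Dict.get? (PySem.Dict.mk v) "type" == some "misconfiguration") then
      recommendations ++ ["Review and correct security configurations"] else recommendations
  let recommendations :=
    if vulnerabilities.any (fun v => PySem.Dict.get? (PySem.Dict.mk v) "type" == some "outdated") then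
      recommendations ++ ["Update outdated components to latest versions"] else recommendations
  recommendations

-- ===== PORT B =====
def genRemStep (st : Bool × Bool × Bool) (v : List (String × String)) : Bool × Bool × Bool :=
  let st := if PySem.Dict.get? (PySem.Dict.mk v) "severity" == some "critical" then (true, st.2.1, st.2.2) else st
  let st := if PySem.Dict.get? (PySem.Dict.mk v) "type" == some "misconfiguration" then (st.1, true, st.2.2) else st
  if PySem.Dict.get? (PySem.Dict.mk v) "type" == some "outdated" then (st.1, st.2.1, true) else st

def generate_remediation_recommendations_py_alt (vulnerabilities : List (List (String × String))) : List String :=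
  let flags := vulnerabilities.foldl genRemStep (false, false, false)
  let out : List String := []
  let out := if flags.1 then out ++ ["Immediately patch critical vulnerabilities"] else out
  let out := if flags.2.1 then out ++ ["Review and correct security configurations"] else out
  let out := if flags.2.2 then out ++ ["Update outdated components to latest versions"] else out
  out

-- ===== PRECONDITION & SPEC =====
def Spec_generate_remediation_recommendations_py (vulnerabilities : List (List (String × String))) (out : List String) : Prop := out = generate_remediation_recommendations_py_alt vulnerabilities
instance (vulnerabilities : List (List (String × String))) (out : List String) : Decidable (Spec_generate_remediation_recommendations_py vulnerabilities out) := by unfold Spec_generate_remediation_recommendations_py; infer_instance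

-- ===== CLAIM (what is proved, stated in full; the proofs are below) =====
def Claim_equal_generate_remediation_recommendations_py : Prop := ∀ (vulnerabilities : List (List (String × String))), Dom_generate_remediation_recommendations_py vulnerabilities → Spec_generate_remediation_recommendations_py vulnerabilities (generate_remediation_recommendations_py vulnerabilities)

-- ===== LEMMAS AND PROOFS =====
theorem genRemFold (l : List (List (String × String))) (st : Bool × Bool × Bool) :
    l.foldl genRemStep st =
      (st.1 || l.any (fun v => PySem.Dict.get? (PySem.Dict.mk v) "severity" == some "critical"),
       st.2.1 || l.any (fun v => PySem.Dict.get? (PySem.Dict.mk v) "type" == some "misconfiguration"),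
       st.2.2 || l.any (fun v => PySem.Dict.get? (PySem.Dict.mk v) "type" == some "outdated")) := by
  induction l generalizing st with
  | nil => simp
  | cons v t ih =>
    obtain ⟨a, b, c⟩ := st
    simp only [List.foldl_cons, List.any_cons, genRemStep, ih]
    cases h1 : ((PySem.Dict.mk v).get? "severity" == some "critical") <;>
    cases h2 : ((PySem.Dict.mk v).get? "type" == some "misconfiguration") <;>
    cases h3 : ((PySem.Dict.mk v).get? "type" == some "outdated") <;>
      simp [h1, h2, h3]

-- ===== VERDICT (by name: the statement is the Claim_ definition above) =====
theorem generate_remediation_recommendations_py_spec : Claim_equal_generate_remediation_recommendations_py := by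
  intro vulnerabilities _
  unfold Spec_generate_remediation_recommendations_py generate_remediation_recommendations_py
    generate_remediation_recommendations_py_alt
  simp only [genRemFold, Bool.false_or]
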